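-- pv_equiv track=rewrite | github.com/YusufIpek/MachineLearning | Assignment 1/assignment1.py | generate_general_A_matrix
-- ===== SOURCE A (Python) =====
-- def sigma(order, x_values):
--     """
--         to perform the summation over sigma used to generate the A matrix
--     """
--     result = 0
--     for value in x_values:
--         result += value**order
--     return result
--
-- def generate_general_A_matrix(m_order, x_values):
--     """
--         this function to compute the A matrix from the x values
--     """
--     coefficient = m_order+1
--     A = []
--     for i in range(0, coefficient):
--         tmp = []
--         for j in range(0, coefficient):
--             tmp.append(sigma(i+j, x_values))
--         A.append(tmp)
--     return A
-- ===== SOURCE B (Python) =====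
-- def generate_general_A_matrix(m_order, x_values):
--     # Build the power-sum table S[k] = sum(v**k) for k = 0..2*m_order in one pass,
--     # maintaining the current powers incrementally; rows of A are then slices of S.
--     n = m_order + 1
--     S = []
--     powers = [1] * len(x_values)
--     for _k in range(2 * m_order + 1):
--         S.append(sum(powers))
--         powers = [p * v for p, v in zip(powers, x_values)]
--     return [S[i:i + n] for i in range(n)]
-- ===== Notes on version B (the rewrite author's own statement) =====
-- stated objective: alternative
-- what changed: Replaces the per-entry sigma recomputation (each of the (m+1)^2 entries sums v**(i+j) over all x) by one incremental pass that builds the power-sum table S[k] for k=0..2m and fills each row as a slice of S.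
import Mathlib
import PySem

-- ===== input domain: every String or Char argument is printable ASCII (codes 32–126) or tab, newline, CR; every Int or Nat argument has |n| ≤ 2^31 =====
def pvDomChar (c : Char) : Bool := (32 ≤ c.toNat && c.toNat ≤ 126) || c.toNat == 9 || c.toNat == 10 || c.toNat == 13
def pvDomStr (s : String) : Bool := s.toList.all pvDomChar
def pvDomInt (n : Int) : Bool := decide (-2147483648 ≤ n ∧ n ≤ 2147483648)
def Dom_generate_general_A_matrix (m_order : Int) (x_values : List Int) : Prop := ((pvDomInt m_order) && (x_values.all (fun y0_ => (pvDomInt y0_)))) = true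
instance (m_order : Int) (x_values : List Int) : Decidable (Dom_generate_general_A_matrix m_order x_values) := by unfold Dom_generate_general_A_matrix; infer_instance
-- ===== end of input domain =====

-- B replaces the per-entry power-sum recomputation by one incremental power-sum table S[k], k = 0..2m,
-- whose slices are the rows of A; equivalence is proved for all inputs.


-- ===== PORT A =====
-- Python's value ** order is v ^ order.toNat: every call here has order = i + j ≥ 0.
def sigma (order : Int) (x_values : List Int) : Int :=
  x_values.foldl (fun result value => result + value ^ order.toNat) 0

def generate_general_A_matrix (m_order : Int) (x_values : List Int) : List (List Int) :=
  let coefficient := m_order + 1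
  (PySem.List.pyRange 0 coefficient).foldl
    (fun A i =>
      A ++ [(PySem.List.pyRange 0 coefficient).foldl
              (fun tmp j => tmp ++ [sigma (i + j) x_values]) []])
    []

-- ===== PORT B =====
def generate_general_A_matrix_alt (m_order : Int) (x_values : List Int) : List (List Int) :=
  let n := m_order + 1
  let st := (PySem.List.pyRange 0 (2 * m_order + 1)).foldl
    (fun (st : List Int × List Int) _k =>
      (st.1 ++ [st.2.sum], (st.2.zip x_values).map (fun pv => pv.1 * pv.2)))
    ([], x_values.map (fun _ => 1))
  (PySem.List.pyRange 0 n).map (fun i => PySem.List.slice st.1 (some i) (some (i + n)))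

-- ===== PRECONDITION & SPEC =====
def Spec_generate_general_A_matrix (m_order : Int) (x_values : List Int) (out : List (List Int)) : Prop := out = generate_general_A_matrix_alt m_order x_values
instance (m_order : Int) (x_values : List Int) (out : List (List Int)) : Decidable (Spec_generate_general_A_matrix m_order x_values out) := by unfold Spec_generate_general_A_matrix; infer_instance

-- ===== CLAIM (what is proved, stated in full; the proofs are below) =====
def Claim_equal_generate_general_A_matrix : Prop := ∀ (m_order : Int) (x_values : List Int), Dom_generate_general_A_matrix m_order x_values → Spec_generate_general_A_matrix m_order x_values (generate_general_A_matrix m_order x_values)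

-- ===== LEMMAS AND PROOFS =====

-- the power sum S[k] both programs compute
def psum (x : List Int) (k : Nat) : Int := (x.map (fun v => v ^ k)).sum

lemma pyRange_nonpos (c : Int) (h : c ≤ 0) : PySem.List.pyRange 0 c = [] := by
  simp [PySem.List.pyRange]; omega

lemma sigma_eq_psum (x : List Int) (k : Nat) : sigma (k : Int) x = psum x k := by
  simp [sigma, psum, PySem.List.foldl_add]

-- A in row/column map normal form
lemma A_normal (m : Int) (x : List Int) :
    generate_general_A_matrix m x =
      (PySem.List.pyRange 0 (m + 1)).map (fun i =>
        (PySem.List.pyRange 0 (m + 1)).map (fun j => sigma (i + j) x)) := by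
  simp only [generate_general_A_matrix, PySem.List.foldl_append_singleton_eq_map,
    List.nil_append]

-- B's loop invariant: after consuming l, S holds the next l.length power sums and
-- powers holds the (t + l.length)-th powers.
lemma B_loop (x : List Int) (l : List Int) (t : Nat) (S : List Int) :
    l.foldl
      (fun (st : List Int × List Int) _k =>
        (st.1 ++ [st.2.sum], (st.2.zip x).map (fun pv => pv.1 * pv.2)))
      (S, x.map (fun v => v ^ t)) =
    (S ++ (List.range l.length).map (fun k => psum x (t + k)),
     x.map (fun v => v ^ (t + l.length))) := by
  induction l generalizing t S with
  | nil => simp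
  | cons a l ih =>
    have hpow : ((x.map (fun v => v ^ t)).zip x).map (fun pv => pv.1 * pv.2)
        = x.map (fun v => v ^ (t + 1)) := by
      rw [show x = x.map id from (List.map_id x).symm, List.map_map]
      rw [List.zip_map']
      simp [List.map_map, Function.comp, pow_succ]
    simp only [List.foldl_cons, hpow]
    rw [ih (t + 1)]
    have h1 : S ++ [(List.map (fun v => v ^ t) x).sum]
        ++ List.map (fun k => psum x (t + 1 + k)) (List.range l.length)
        = S ++ List.map (fun k => psum x (t + k)) (List.range (l.length + 1)) := by
      rw [List.range_succ_eq_map]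
      simp only [List.map_cons, List.map_map, List.append_assoc, List.cons_append,
        List.nil_append]
      refine congrArg (S ++ ·) ?_
      refine congrArg₂ List.cons ?_ ?_
      · simp [psum]
      · apply List.map_congr_left; intro k _
        have hk : t + 1 + k = t + (k + 1) := by omega
        simp only [Function.comp_apply, Nat.succ_eq_add_one, hk]
    have h2 : (t + 1) + l.length = t + (l.length + 1) := by omega
    simp only [List.append_assoc] at h1 ⊢
    rw [h1, h2]
    simp

-- the slice of the power-sum table is the map over shifted indices
lemma slice_table (x : List Int) (K i n : Nat) (h : i + n ≤ K) :
    PySem.List.slice ((List.range K).map (fun k => psum x k)) (some (i : Int)) (some ((i : Int) + (n : Int)))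
      = (List.range n).map (fun j => psum x (i + j)) := by
  have hc : ((i : Int) + (n : Int)) = ((i + n : Nat) : Int) := by push_cast; ring
  rw [hc, PySem.List.slice_natCast]
  have hlen : i + n - i = n := by omega
  rw [hlen]
  apply List.ext_getElem
  · simp; omega
  · intro j h1 h2
    simp

-- ===== VERDICT (by name: the statement is the Claim_ definition above) =====
theorem generate_general_A_matrix_spec : Claim_equal_generate_general_A_matrix := by
  intro m x _
  unfold Spec_generate_general_A_matrix
  rw [A_normal]
  by_cases hm : m + 1 <= 0
  · have h2 : 2 * m + 1 <= 0 := by omega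
    simp [generate_general_A_matrix_alt, pyRange_nonpos _ hm, pyRange_nonpos _ h2]
  · rw [Int.not_le] at hm
    obtain ⟨m', rfl⟩ : ∃ m' : Nat, m = (m' : Int) := ⟨m.toNat, by omega⟩
    have hc : (m' : Int) + 1 = ((m' + 1 : Nat) : Int) := by push_cast; ring
    have hK : 2 * (m' : Int) + 1 = ((2 * m' + 1 : Nat) : Int) := by push_cast; ring
    have hinit : x.map (fun _ => (1 : Int)) = x.map (fun v => v ^ 0) := by simp
    unfold generate_general_A_matrix_alt
    simp only [hc, hK, PySem.List.pyRange_zero_natCast, hinit]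
    rw [B_loop x _ 0 []]
    simp only [List.length_map, List.length_range, List.nil_append, List.map_map,
      Nat.zero_add]
    apply List.map_congr_left
    intro i hi
    simp only [List.mem_range] at hi
    simp only [Function.comp_apply]
    rw [slice_table x (2 * m' + 1) i (m' + 1) (by omega)]
    apply List.map_congr_left
    intro j hj
    simp only [Function.comp_apply]
    have hij : ((i : Int) + (j : Int)) = ((i + j : Nat) : Int) := by push_cast; ring
    rw [hij, sigma_eq_psum]
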